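-- pv_equiv track=rewrite | github.com/eliottcassidy2000/math | 04-computation/c5_spectral_formula.py | all_circulant_tournaments
-- ===== SOURCE A (Python) =====
-- def all_circulant_tournaments(n):
--     pairs = []
--     used = set()
--     for a in range(1, n):
--         if a not in used:
--             b = n - a
--             if a == b:
--                 return []
--             pairs.append((a, b))
--             used.add(a)
--             used.add(b)
--     results = []
--     for bits in range(2 ** len(pairs)):
--         S = []
--         for i, (a, b) in enumerate(pairs):
--             S.append(a if (bits >> i) & 1 else b)
--         results.append(tuple(sorted(S)))
--     return results
-- ===== SOURCE B (Python) =====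
-- def all_circulant_tournaments(n):
--     # closed form for the complementary pairs + recursive product instead of bit arithmetic
--     if n >= 2 and n % 2 == 0:
--         return []
--     pairs = [(a, n - a) for a in range(1, n // 2 + 1)]
--
--     def choose(ps):
--         if not ps:
--             return [[]]
--         a, b = ps[0]
--         return [pref + s for s in choose(ps[1:]) for pref in ([b], [a])]
--
--     return [tuple(sorted(S)) for S in choose(pairs)]
-- ===== Notes on version B (the rewrite author's own statement) =====
-- stated objective: simpler
-- what changed: B builds the complementary pair list in closed form from a parity test instead of A's used-set scan, and enumerates the selections by a recursive product over the pair list instead of A's bit-mask counter loop.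
import Mathlib
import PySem

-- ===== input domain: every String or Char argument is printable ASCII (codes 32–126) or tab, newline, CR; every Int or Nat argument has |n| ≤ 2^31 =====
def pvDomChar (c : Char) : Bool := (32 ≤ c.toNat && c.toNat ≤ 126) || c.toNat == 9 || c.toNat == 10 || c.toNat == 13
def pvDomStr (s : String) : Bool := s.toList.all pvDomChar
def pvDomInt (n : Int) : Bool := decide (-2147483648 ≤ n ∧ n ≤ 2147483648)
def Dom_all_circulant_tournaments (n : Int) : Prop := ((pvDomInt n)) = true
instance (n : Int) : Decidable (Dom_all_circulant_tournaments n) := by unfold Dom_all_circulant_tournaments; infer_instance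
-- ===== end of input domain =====

-- B replaces A's used-set scan and bit-mask enumeration by a closed-form pair list and a
-- recursive product over the pairs (objective: simpler).

-- ===== PORT A =====
-- the 'for a in range(1, n)' loop with early 'return []' (none signals the early return)
def aPairsLoop (n : Int) : List Int → List (Int × Int) → PySem.Set Int → Option (List (Int × Int))
  | [], pairs, _ => some pairs
  | a :: rest, pairs, used =>
    if PySem.Set.contains used a then aPairsLoop n rest pairs used
    else
      let b := n - a
      if a = b then none
      else aPairsLoop n rest (pairs ++ [(a, b)]) (PySem.Set.add (PySem.Set.add used a) b)

-- the inner 'for i, (a, b) in enumerate(pairs)' loop; '(bits >> i) & 1' is ported as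
-- floor-division by 2^i modulo 2, exact here since bits ranges over range(2**len(pairs)) ≥ 0
def aInner (bits : Int) (pairs : List (Int × Int)) : List Int :=
  (PySem.List.enumerate pairs 0).foldl
    (fun S p =>
      S ++ [if PySem.Int.mod (PySem.Int.floordiv bits (2 ^ p.1.toNat)) 2 = 1 then p.2.1 else p.2.2])
    []

def all_circulant_tournaments (n : Int) : List (List Int) :=
  match aPairsLoop n (PySem.List.pyRange 1 n 1) [] PySem.Set.empty with
  | none => []
  | some pairs =>
    (PySem.List.pyRange 0 (2 ^ pairs.length) 1).foldl
      (fun results bits => results ++ [PySem.List.sorted (aInner bits pairs) (fun x => x) false])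
      []

-- ===== PORT B =====
def bChoose : List (Int × Int) → List (List Int)
  | [] => [[]]
  | (a, b) :: rest => (bChoose rest).flatMap (fun s => [b :: s, a :: s])

def all_circulant_tournaments_alt (n : Int) : List (List Int) :=
  if 2 ≤ n ∧ PySem.Int.mod n 2 = 0 then []
  else
    let pairs := (PySem.List.pyRange 1 (PySem.Int.floordiv n 2 + 1) 1).map (fun a => (a, n - a))
    (bChoose pairs).map (fun S => PySem.List.sorted S (fun x => x) false)

-- ===== PRECONDITION & SPEC =====
def Spec_all_circulant_tournaments (n : Int) (out : List (List Int)) : Prop := out = all_circulant_tournaments_alt n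
instance (n : Int) (out : List (List Int)) : Decidable (Spec_all_circulant_tournaments n out) := by unfold Spec_all_circulant_tournaments; infer_instance

-- ===== CLAIM (what is proved, stated in full; the proofs are below) =====
def Claim_equal_all_circulant_tournaments : Prop := ∀ (n : Int), Dom_all_circulant_tournaments n → Spec_all_circulant_tournaments n (all_circulant_tournaments n)

-- ===== LEMMAS AND PROOFS =====

-- a fold that only appends singletons is a map
theorem foldl_push {α β : Type} (f : α → β) (l : List α) (acc : List β) :
    l.foldl (fun r x => r ++ [f x]) acc = acc ++ l.map f := by
  induction l generalizing acc with
  | nil => simp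
  | cons x xs ih => simp [List.foldl, ih]

theorem enumerate_shift {α : Type} (xs : List α) (s : Int) :
    PySem.List.enumerate xs (s + 1) = (PySem.List.enumerate xs s).map (fun p => (p.1 + 1, p.2)) := by
  induction xs generalizing s with
  | nil => simp [PySem.List.enumerate_nil]
  | cons x t ih => simp [PySem.List.enumerate_cons, ih]

theorem contains_add (s : PySem.Set Int) (y x : Int) :
    PySem.Set.contains (PySem.Set.add s y) x = true ↔ PySem.Set.contains s x = true ∨ x = y := by
  simp [PySem.Set.mem_add]

theorem aInner_nil (bits : Int) : aInner bits [] = [] := by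
  simp [aInner, PySem.List.enumerate_nil]

theorem aInner_cons (q : Nat) (a b : Int) (rest : List (Int × Int)) :
    aInner (q : Int) ((a, b) :: rest) =
      (if q % 2 = 1 then a else b) :: aInner ((q / 2 : Nat) : Int) rest := by
  rw [aInner, aInner, foldl_push, foldl_push, List.nil_append, List.nil_append,
    PySem.List.enumerate_cons]
  rw [List.map_cons]
  congr 1
  · have h1 : PySem.Int.floordiv (q : Int) ((2 : Int) ^ ((0 : Int)).toNat) = (q : Int) := by
      simpa using PySem.Int.floordiv_natCast q 1
    simp only [h1]
    have h2 : PySem.Int.mod (q : Int) 2 = ((q % 2 : Nat) : Int) := by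
      exact_mod_cast PySem.Int.mod_natCast q 2
    rw [h2]
    by_cases h : q % 2 = 1
    · simp [h]
    · have h0 : q % 2 = 0 := by omega
      simp [h0]
  · rw [enumerate_shift rest (0 : Int), List.map_map]
    apply List.map_congr_left
    intro p hp
    rcases (PySem.List.mem_enumerate_iff _ _ _).1 hp with ⟨k, hk, hpk⟩
    subst hpk
    simp only [Function.comp]
    congr 1
    have e1 : (((0 : Int) + (k : Int)) + 1).toNat = k + 1 := by omega
    have e0 : ((0 : Int) + (k : Int)).toNat = k := by omega
    rw [e1, e0]
    have c1 : ((2 : Int) ^ (k + 1)) = (((2 ^ (k + 1) : Nat)) : Int) := by push_cast; ring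
    have c0 : ((2 : Int) ^ k) = (((2 ^ k : Nat)) : Int) := by push_cast; ring
    rw [c1, c0, PySem.Int.floordiv_natCast, PySem.Int.floordiv_natCast]
    have : q / 2 ^ (k + 1) = q / 2 / 2 ^ k := by
      rw [Nat.div_div_eq_div_mul]
      congr 1
      ring
    rw [this]

theorem range_double (m : Nat) :
    List.range (2 * m) = (List.range m).flatMap (fun q => [2 * q, 2 * q + 1]) := by
  induction m with
  | zero => simp
  | succ m ih =>
    have : 2 * (m + 1) = (2 * m + 1) + 1 := by ring
    rw [this, List.range_succ, List.range_succ, ih, List.range_succ]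
    simp [List.flatMap_append]

theorem bits_eq_choose (pairs : List (Int × Int)) :
    (List.range (2 ^ pairs.length)).map (fun (q : Nat) => aInner (q : Int) pairs) = bChoose pairs := by
  induction pairs with
  | nil => simp [bChoose, aInner_nil]
  | cons p rest ih =>
    obtain ⟨a, b⟩ := p
    have hlen : 2 ^ ((a, b) :: rest).length = 2 * 2 ^ rest.length := by
      simp [List.length_cons, pow_succ]; ring
    rw [hlen, range_double, List.map_flatMap, bChoose, ← ih, List.flatMap_map]
    apply List.flatMap_congr
    intro q hq
    have e1 : aInner (2 * (q : Int)) ((a, b) :: rest) = b :: aInner ((q : Nat) : Int) rest := by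
      have h := aInner_cons (2 * q) a b rest
      have h2 : (2 * q) % 2 = 0 := by omega
      have h3 : (2 * q) / 2 = q := by omega
      rw [h2, h3] at h
      push_cast at h
      simpa using h
    have e2 : aInner (2 * (q : Int) + 1) ((a, b) :: rest) = a :: aInner ((q : Nat) : Int) rest := by
      have h := aInner_cons (2 * q + 1) a b rest
      have h2 : (2 * q + 1) % 2 = 1 := by omega
      have h3 : (2 * q + 1) / 2 = q := by omega
      rw [h2, h3] at h
      push_cast at h
      simpa using h
    simp [e1, e2]

theorem results_eq (pairs : List (Int × Int)) :
    (PySem.List.pyRange 0 (2 ^ pairs.length) 1).foldl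
      (fun results bits => results ++ [PySem.List.sorted (aInner bits pairs) (fun x => x) false]) []
    = (bChoose pairs).map (fun S => PySem.List.sorted S (fun x => x) false) := by
  rw [foldl_push, List.nil_append, PySem.List.pyRange_one]
  have ht : (((2 : Int) ^ pairs.length - 0)).toNat = 2 ^ pairs.length := by
    have h : ((2 : Int) ^ pairs.length) = (((2 ^ pairs.length : Nat)) : Int) := by push_cast; ring
    rw [sub_zero, h, Int.toNat_natCast]
  rw [ht, List.map_map, ← bits_eq_choose pairs, List.map_map]
  apply List.map_congr_left
  intro k hk
  simp [Function.comp]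

theorem skip_loop (n : Int) (l : List Int) (pairs : List (Int × Int)) (used : PySem.Set Int)
    (h : ∀ x ∈ l, PySem.Set.contains used x = true) :
    aPairsLoop n l pairs used = some pairs := by
  induction l with
  | nil => rfl
  | cons x t ih =>
    rw [aPairsLoop, h x (by simp)]
    simp only [if_true]
    exact ih (fun y hy => h y (by simp [hy]))

theorem main_loop (n : Int) (hn : 2 ≤ n) (j : Nat) :
    ∀ (a : Int) (pairs : List (Int × Int)) (used : PySem.Set Int),
    a = n / 2 + 1 - j → 1 ≤ a →
    (∀ x, PySem.Set.contains used x = true ↔ (1 ≤ x ∧ x < a) ∨ (n - a < x ∧ x ≤ n - 1)) →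
    aPairsLoop n (PySem.List.pyRange a n 1) pairs used =
      if 2 ∣ n ∧ a ≤ n / 2 then none
      else some (pairs ++ (PySem.List.pyRange a (n / 2 + 1) 1).map (fun x => (x, n - x))) := by
  induction j with
  | zero =>
    intro a pairs used ha h1 hused
    have haeq : a = n / 2 + 1 := by omega
    have hnone : ¬ (2 ∣ n ∧ a ≤ n / 2) := by omega
    rw [if_neg hnone]
    have hr : PySem.List.pyRange a (n / 2 + 1) 1 = [] :=
      PySem.List.pyRange_one_eq_nil (by omega)
    rw [hr, List.map_nil, List.append_nil]
    apply skip_loop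
    intro x hx
    have hx' := PySem.List.mem_pyRange_one.1 hx
    rw [hused]
    omega
  | succ j ih =>
    intro a pairs used ha h1 hused
    have hak : a ≤ n / 2 := by omega
    have haltn : a < n := by omega
    rw [PySem.List.pyRange_one_cons haltn, aPairsLoop]
    have hnotmem : PySem.Set.contains used a = false := by
      by_cases h : PySem.Set.contains used a = true
      · exfalso; have := (hused a).1 h; omega
      · simpa using h
    rw [hnotmem]
    simp only [Bool.false_eq_true, if_false]
    by_cases heq : a = n - a
    · rw [if_pos heq]
      have : 2 ∣ n ∧ a ≤ n / 2 := ⟨⟨a, by omega⟩, hak⟩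
      rw [if_pos this]
    · rw [if_neg heq]
      have h2an : 2 * a ≠ n := by omega
      have hrec := ih (a + 1) (pairs ++ [(a, n - a)])
        (PySem.Set.add (PySem.Set.add used a) (n - a))
        (by omega) (by omega)
        (by
          intro x
          rw [contains_add, contains_add, hused]
          omega)
      rw [hrec]
      by_cases hdvd : 2 ∣ n
      · have ha1 : a + 1 ≤ n / 2 := by
          obtain ⟨m, hm⟩ := hdvd
          omega
        rw [if_pos ⟨hdvd, ha1⟩, if_pos ⟨hdvd, hak⟩]
      · rw [if_neg (by tauto), if_neg (by tauto)]
        rw [PySem.List.pyRange_one_cons (by omega : a < n / 2 + 1), List.map_cons]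
        simp
theorem all_circulant_tournaments_spec : Claim_equal_all_circulant_tournaments := by
  intro n _
  unfold Spec_all_circulant_tournaments all_circulant_tournaments all_circulant_tournaments_alt
  have hfd : PySem.Int.floordiv n 2 = n / 2 := PySem.Int.floordiv_eq_ediv_of_pos (by norm_num)
  have hmd : PySem.Int.mod n 2 = n % 2 := PySem.Int.mod_eq_emod_of_pos (by norm_num)
  by_cases hn2 : 2 ≤ n
  · by_cases hev : n % 2 = 0
    · -- even n ≥ 2: both return []
      have hloop := main_loop n hn2 (n / 2).toNat 1 [] PySem.Set.empty
        (by omega) (by omega)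
        (by intro x; simp [PySem.Set.empty])
      have hcond : 2 ∣ n ∧ (1:Int) ≤ n / 2 := ⟨by omega, by omega⟩
      rw [if_pos hcond] at hloop
      rw [hloop]
      rw [if_pos ⟨hn2, by rw [hmd]; exact hev⟩]
    · -- odd n ≥ 2
      have hloop := main_loop n hn2 (n / 2).toNat 1 [] PySem.Set.empty
        (by omega) (by omega)
        (by intro x; simp [PySem.Set.empty])
      rw [if_neg (by omega : ¬ (2 ∣ n ∧ (1:Int) ≤ n / 2))] at hloop
      rw [hloop, List.nil_append]
      rw [if_neg (by rw [hmd]; omega), hfd]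
      exact results_eq _
  · -- n ≤ 1: loop range empty, pairs = []
    have hr : PySem.List.pyRange 1 n 1 = [] := PySem.List.pyRange_one_eq_nil (by omega)
    rw [hr]
    rw [if_neg (by rw [hmd]; omega : ¬ (2 ≤ n ∧ PySem.Int.mod n 2 = 0))]
    have hrB : PySem.List.pyRange 1 (PySem.Int.floordiv n 2 + 1) 1 = [] := by
      rw [hfd]; exact PySem.List.pyRange_one_eq_nil (by omega)
    rw [hrB]
    exact results_eq []
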